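-- pv_equiv track=rewrite | github.com/CAREamics/careamics-napari | tests/test_predictions.py | generate_combinations_and_rotations
-- ===== SOURCE A (Python) =====
-- from itertools import combinations
--
-- def generate_combinations_and_rotations(s):
--     # generate all combinations
--     combinations_list = []
--     for r in range(1, len(s) + 1):
--         combinations_list.extend([''.join(comb) for comb in combinations(s, r)])
--
--     # generate all rotations
--     rotations = set()
--     for i in range(len(s)):
--         rotated = s[i:] + s[:i]
--         rotations.add(rotated)
--
--     # combine results
--     all_results = set(combinations_list)
--     for rot in rotations:
--         for r in range(1, len(rot) + 1):
--             all_results.update([''.join(comb) for comb in combinations(rot, r)])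
--
--     # add an empty
--     all_results.add("")
--
--     return sorted(all_results)
-- ===== SOURCE B (Python) =====
-- def generate_combinations_and_rotations(s):
--     # Iterative powerset doubling per rotation; the empty string is the seed subsequence.
--     result = {""}
--     for i in range(len(s)):
--         rot = s[i:] + s[:i]
--         subs = [""]
--         for c in rot:
--             subs = subs + [x + c for x in subs]
--         result.update(subs)
--     return sorted(result)
-- ===== Notes on version B (the rewrite author's own statement) =====
-- stated objective: simpler
-- what changed: Replaces length-indexed itertools.combinations over r=1..len (run once for s and again for every rotation) plus a separate final add of the empty result by a single pass over the rotations that builds each rotation's full powerset by iterative accumulator doubling (subs = subs + [x+c for x in subs]), whose seed already yields the empty subsequence.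
import Mathlib
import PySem

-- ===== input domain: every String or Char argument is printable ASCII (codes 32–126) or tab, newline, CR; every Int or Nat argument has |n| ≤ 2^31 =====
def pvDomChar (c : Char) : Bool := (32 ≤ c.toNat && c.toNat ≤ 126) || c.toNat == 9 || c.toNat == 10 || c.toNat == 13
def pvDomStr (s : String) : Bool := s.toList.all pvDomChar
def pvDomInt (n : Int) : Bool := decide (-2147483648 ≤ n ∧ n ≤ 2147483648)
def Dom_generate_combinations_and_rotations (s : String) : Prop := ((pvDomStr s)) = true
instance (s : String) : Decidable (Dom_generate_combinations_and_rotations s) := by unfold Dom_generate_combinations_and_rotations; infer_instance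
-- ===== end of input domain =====

-- B replaces the length-indexed combinations passes by one powerset-doubling pass per rotation (objective: simpler).

-- ===== PORT A =====
-- Port of A: combinations for r=1..len(s), the set of rotations, combinations of each
-- rotation, add "", sort. Strings are handled on the List Char side (PySem convention).
def generate_combinations_and_rotations (s : String) : List String :=
  let combinations_list : List String :=
    (PySem.List.pyRange 1 (PySem.Str.len s + 1) 1).foldl
      (fun acc r => acc ++ (PySem.List.combinations s.toList r.toNat).map (fun c => String.ofList c)) []
  let rotations : PySem.Set String :=
    (PySem.List.pyRange 0 (PySem.Str.len s) 1).foldl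
      (fun rs i => PySem.Set.add rs
        (String.ofList (PySem.List.slice s.toList (some i) none ++ PySem.List.slice s.toList none (some i))))
      PySem.Set.empty
  let all_results0 : PySem.Set String := PySem.Set.ofList combinations_list
  let all_results1 : PySem.Set String :=
    rotations.foldl
      (fun ar rot =>
        (PySem.List.pyRange 1 (PySem.Str.len rot + 1) 1).foldl
          (fun ar2 r => PySem.Set.update ar2 ((PySem.List.combinations rot.toList r.toNat).map (fun c => String.ofList c)))
          ar)
      all_results0
  let all_results2 : PySem.Set String := PySem.Set.add all_results1 ""
  PySem.List.sorted all_results2 (fun x => x) false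

-- ===== PORT B =====
-- Port of B: one pass over the rotations; each rotation's powerset by iterative doubling
-- (subs = subs + [x + c for x in subs]) seeded [""], accumulated into a set seeded {""}.
def generate_combinations_and_rotations_alt (s : String) : List String :=
  let result : PySem.Set String :=
    (PySem.List.pyRange 0 (PySem.Str.len s) 1).foldl
      (fun res i =>
        let rot : List Char :=
          PySem.List.slice s.toList (some i) none ++ PySem.List.slice s.toList none (some i)
        let subs : List (List Char) :=
          rot.foldl (fun su c => su ++ su.map (fun x => x ++ [c])) [[]]
        PySem.Set.update res (subs.map (fun l => String.ofList l)))
      (PySem.Set.add PySem.Set.empty "")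
  PySem.List.sorted result (fun x => x) false

-- ===== PRECONDITION & SPEC =====
def Spec_generate_combinations_and_rotations (s : String) (out : List String) : Prop := out = generate_combinations_and_rotations_alt s
instance (s : String) (out : List String) : Decidable (Spec_generate_combinations_and_rotations s out) := by unfold Spec_generate_combinations_and_rotations; infer_instance

-- ===== CLAIM (what is proved, stated in full; the proofs are below) =====
def Claim_equal_generate_combinations_and_rotations : Prop := ∀ (s : String), Dom_generate_combinations_and_rotations s → Spec_generate_combinations_and_rotations s (generate_combinations_and_rotations s)

-- ===== LEMMAS AND PROOFS =====

-- rotation i of s, as the character list both ports compute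
def rotChars (s : String) (i : Int) : List Char :=
  PySem.List.slice s.toList (some i) none ++ PySem.List.slice s.toList none (some i)

-- a foldl whose step adds exactly the elements satisfying Q b accumulates s0 ∪ ⋃ Q
lemma mem_foldl_step {A B : Type} (step : List A → B → List A) (Q : B → A → Prop)
    (h : ∀ (ar : List A) (b : B) (x : A), x ∈ step ar b ↔ x ∈ ar ∨ Q b x) (l : List B) :
    ∀ (s0 : List A) (x : A), x ∈ l.foldl step s0 ↔ x ∈ s0 ∨ ∃ b ∈ l, Q b x := by
  induction l with
  | nil => intro s0 x; simp
  | cons b l ih =>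
    intro s0 x
    rw [List.foldl_cons, ih, h]
    constructor
    · rintro (⟨hx | hq⟩ | ⟨b', hb', hq⟩)
      · exact Or.inl hx
      · exact Or.inr ⟨b, List.mem_cons_self, hq⟩
      · exact Or.inr ⟨b', List.mem_cons_of_mem _ hb', hq⟩
    · rintro (hx | ⟨b', hb', hq⟩)
      · exact Or.inl (Or.inl hx)
      · rcases List.mem_cons.mp hb' with rfl | hb'
        · exact Or.inl (Or.inr hq)
        · exact Or.inr ⟨b', hb', hq⟩

lemma nodup_foldl_step {A B : Type} (step : List A → B → List A)
    (h : ∀ (ar : List A) (b : B), ar.Nodup → (step ar b).Nodup) (l : List B) :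
    ∀ (s0 : List A), s0.Nodup → (l.foldl step s0).Nodup := by
  induction l with
  | nil => intro s0 hs; simpa using hs
  | cons b l ih => intro s0 hs; rw [List.foldl_cons]; exact ih _ (h _ _ hs)

-- the iterative doubling loop of B enumerates exactly acc ++ (a sublist of cs) each
lemma mem_pow_doubling (cs : List Char) :
    ∀ (acc : List (List Char)) (l : List Char),
      l ∈ cs.foldl (fun su c => su ++ su.map (fun x => x ++ [c])) acc ↔
        ∃ a ∈ acc, ∃ t, t.Sublist cs ∧ l = a ++ t := by
  induction cs with
  | nil => intro acc l; simp
  | cons c cs ih =>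
    intro acc l
    rw [List.foldl_cons, ih]
    constructor
    · rintro ⟨a, ha, t, ht, rfl⟩
      rcases List.mem_append.mp ha with h | h
      · exact ⟨a, h, t, ht.cons _, rfl⟩
      · obtain ⟨a', ha', rfl⟩ := List.mem_map.mp h
        exact ⟨a', ha', c :: t, List.sublist_cons_iff.mpr (Or.inr ⟨t, rfl, ht⟩), by simp⟩
    · rintro ⟨a, ha, t, ht, rfl⟩
      rcases List.sublist_cons_iff.mp ht with h | ⟨r, rfl, hr⟩
      · exact ⟨a, List.mem_append.mpr (Or.inl ha), t, h, rfl⟩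
      · exact ⟨a ++ [c], List.mem_append.mpr (Or.inr (List.mem_map.mpr ⟨a, ha, rfl⟩)), r, hr,
          by simp⟩

-- the union over r = 1..len(xs) of length-r combinations is the nonempty sublists
lemma exists_range_combos (xs : List Char) (x : String) :
    (∃ r ∈ PySem.List.pyRange 1 ((xs.length : Int) + 1) 1,
        x ∈ (PySem.List.combinations xs r.toNat).map (fun c => String.ofList c)) ↔
      x.toList.Sublist xs ∧ x.toList ≠ [] := by
  constructor
  · rintro ⟨r, hr, hx⟩
    obtain ⟨c, hc, rfl⟩ := List.mem_map.mp hx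
    obtain ⟨hsub, hlen⟩ := (PySem.List.mem_combinations_iff xs r.toNat c).mp hc
    have hr' := PySem.List.mem_pyRange_one.mp hr
    rw [String.toList_ofList]
    refine ⟨hsub, ?_⟩
    intro hnil
    rw [hnil] at hlen
    simp at hlen
    omega
  · rintro ⟨hsub, hne⟩
    refine ⟨(x.toList.length : Int), ?_, ?_⟩
    · rw [PySem.List.mem_pyRange_one]
      have h1 : 0 < x.toList.length := List.length_pos_iff.mpr hne
      have h2 : x.toList.length ≤ xs.length := hsub.length_le
      omega
    · refine List.mem_map.mpr ⟨x.toList, ?_, (String.ofList_toList (s := x))⟩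
      exact (PySem.List.mem_combinations_iff xs _ x.toList).mpr ⟨hsub, by simp⟩

lemma mem_combos_loop (xs : List Char) (a0 : List String) (x : String) :
    x ∈ (PySem.List.pyRange 1 ((xs.length : Int) + 1) 1).foldl
        (fun acc r => acc ++ (PySem.List.combinations xs r.toNat).map (fun c => String.ofList c))
        a0 ↔
      x ∈ a0 ∨ (x.toList.Sublist xs ∧ x.toList ≠ []) := by
  rw [mem_foldl_step _
      (fun r y => y ∈ (PySem.List.combinations xs r.toNat).map (fun c => String.ofList c))
      (fun ar b y => List.mem_append)]
  exact or_congr_right (exists_range_combos xs x)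

lemma mem_update_loop (xs : List Char) (a0 : PySem.Set String) (x : String) :
    x ∈ (PySem.List.pyRange 1 ((xs.length : Int) + 1) 1).foldl
        (fun ar2 r =>
          PySem.Set.update ar2 ((PySem.List.combinations xs r.toNat).map (fun c => String.ofList c)))
        a0 ↔
      x ∈ a0 ∨ (x.toList.Sublist xs ∧ x.toList ≠ []) := by
  rw [mem_foldl_step _
      (fun r y => y ∈ (PySem.List.combinations xs r.toNat).map (fun c => String.ofList c))
      (fun ar b y => PySem.Set.mem_update ar _ y)]
  exact or_congr_right (exists_range_combos xs x)

lemma rotChars_zero (s : String) : rotChars s 0 = s.toList := by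
  have h1 := PySem.List.slice_from (xs := s.toList) (a := 0) (le_refl 0)
  have h2 := PySem.List.slice_to (xs := s.toList) (b := 0) (le_refl 0)
  simp [rotChars, h1, h2]

-- the common membership characterisation both final sets reduce to
lemma key_iff (s x : String) :
    (((x.toList.Sublist s.toList ∧ x.toList ≠ []) ∨
        ∃ i : Int, (0 ≤ i ∧ i < (s.toList.length : Int)) ∧
          (x.toList.Sublist (rotChars s i) ∧ x.toList ≠ [])) ∨ x = "") ↔
      (x = "" ∨ ∃ i : Int, (0 ≤ i ∧ i < (s.toList.length : Int)) ∧
          x.toList.Sublist (rotChars s i)) := by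
  constructor
  · rintro ((⟨hsub, hne⟩ | ⟨i, hi, hsub, hne⟩) | rfl)
    · refine Or.inr ⟨0, ⟨le_refl 0, ?_⟩, by rwa [rotChars_zero]⟩
      have h1 : 0 < x.toList.length := List.length_pos_iff.mpr hne
      have h2 : x.toList.length ≤ s.toList.length := hsub.length_le
      omega
    · exact Or.inr ⟨i, hi, hsub⟩
    · exact Or.inl rfl
  · rintro (rfl | ⟨i, hi, hsub⟩)
    · exact Or.inr rfl
    · by_cases hnil : x.toList = []
      · exact Or.inr (String.toList_inj.mp (by simpa using hnil))
      · exact Or.inl (Or.inr ⟨i, hi, hsub, hnil⟩)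

lemma mem_subs_map (rot : List Char) (x : String) :
    x ∈ ((rot.foldl (fun su c => su ++ su.map (fun x => x ++ [c])) [[]]).map
        (fun l => String.ofList l)) ↔
      x.toList.Sublist rot := by
  rw [List.mem_map]
  constructor
  · rintro ⟨l, hl, rfl⟩
    obtain ⟨a, ha, t, ht, rfl⟩ := (mem_pow_doubling rot [[]] l).mp hl
    simp only [List.mem_singleton] at ha
    subst ha
    simpa using ht
  · intro hsub
    exact ⟨x.toList, (mem_pow_doubling rot [[]] x.toList).mpr
      ⟨[], List.mem_singleton.mpr rfl, x.toList, hsub, rfl⟩, (String.ofList_toList (s := x))⟩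

-- ===== VERDICT (by name: the statement is the Claim_ definition above) =====
theorem generate_combinations_and_rotations_spec : Claim_equal_generate_combinations_and_rotations := by
  intro s _
  unfold Spec_generate_combinations_and_rotations
  unfold generate_combinations_and_rotations generate_combinations_and_rotations_alt
  simp only [PySem.Str.len_eq]
  apply PySem.List.sorted_eq_sorted_of_perm _ _ _ (fun a b h => h)
  rw [List.perm_ext_iff_of_nodup ?nA ?nB]
  case nA =>
    apply PySem.Set.nodup_add _ _
    apply nodup_foldl_step _ ?hstep _ _ (PySem.Set.nodup_ofList _)
    intro ar rot har
    exact nodup_foldl_step _ (fun ar2 r h2 => PySem.Set.nodup_update _ _ h2) _ _ har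
  case nB =>
    apply nodup_foldl_step _ ?hstepB _ _ (PySem.Set.nodup_add _ _ List.nodup_nil)
    intro ar i har
    exact PySem.Set.nodup_update _ _ har
  intro x
  rw [PySem.Set.mem_add,
    mem_foldl_step _ (fun rot y => y.toList.Sublist rot.toList ∧ y.toList ≠ [])
      (fun ar rot y => mem_update_loop rot.toList ar y),
    PySem.Set.mem_ofList,
    mem_combos_loop s.toList [] x,
    mem_foldl_step _
      (fun i y => y.toList.Sublist
        (PySem.List.slice s.toList (some i) none ++ PySem.List.slice s.toList none (some i)))
      (fun ar i y => (PySem.Set.mem_update ar _ y).trans (or_congr_right (mem_subs_map _ y))),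
    PySem.Set.mem_add]
  simp only [PySem.Set.mem_foldl_add, PySem.List.mem_pyRange_one, List.not_mem_nil, false_or,
    PySem.Set.empty]
  have hswap : ∀ (Q : String → Prop),
      (∃ b, (∃ i : Int, (0 ≤ i ∧ i < (s.toList.length : Int)) ∧
          b = String.ofList (PySem.List.slice s.toList (some i) none ++
            PySem.List.slice s.toList none (some i))) ∧ Q b) ↔
        ∃ i : Int, (0 ≤ i ∧ i < (s.toList.length : Int)) ∧ Q (String.ofList (rotChars s i)) := by
    intro Q
    constructor
    · rintro ⟨b, ⟨i, hi, rfl⟩, hq⟩; exact ⟨i, hi, hq⟩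
    · rintro ⟨i, hi, hq⟩; exact ⟨_, ⟨i, hi, rfl⟩, hq⟩
  rw [hswap (fun b => x.toList.Sublist b.toList ∧ x.toList ≠ [])]
  simp only [String.toList_ofList]
  exact key_iff s x
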